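-- pv_equiv track=rewrite | github.com/ruisi-su/concrete_dep | lpcfg/preprocess.py | is_next_open_bracket
-- ===== SOURCE A (Python) =====
-- def is_next_open_bracket(line, start_idx):
--     for char in line[(start_idx + 1) :]:
--         if char == "(":
--             return True
--         elif char == ")":
--             return False
--     raise IndexError(
--         "Bracket possibly not balanced, open bracket not followed by closed bracket"
--     )
-- ===== SOURCE B (Python) =====
-- def is_next_open_bracket(line, start_idx):
--     sub = line[start_idx + 1:]
--     i = sub.find("(")
--     j = sub.find(")")
--     if i == -1 and j == -1:
--         raise IndexError(
--             "Bracket possibly not balanced, open bracket not followed by closed bracket"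
--         )
--     if j == -1:
--         return True
--     if i == -1:
--         return False
--     return i < j
-- ===== Notes on version B (the rewrite author's own statement) =====
-- stated objective: idiomatic
-- what changed: Replaces the explicit character-by-character scan with two str.find calls on the slice and a positional comparison of the first '(' and first ')' indices.
import Mathlib
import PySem

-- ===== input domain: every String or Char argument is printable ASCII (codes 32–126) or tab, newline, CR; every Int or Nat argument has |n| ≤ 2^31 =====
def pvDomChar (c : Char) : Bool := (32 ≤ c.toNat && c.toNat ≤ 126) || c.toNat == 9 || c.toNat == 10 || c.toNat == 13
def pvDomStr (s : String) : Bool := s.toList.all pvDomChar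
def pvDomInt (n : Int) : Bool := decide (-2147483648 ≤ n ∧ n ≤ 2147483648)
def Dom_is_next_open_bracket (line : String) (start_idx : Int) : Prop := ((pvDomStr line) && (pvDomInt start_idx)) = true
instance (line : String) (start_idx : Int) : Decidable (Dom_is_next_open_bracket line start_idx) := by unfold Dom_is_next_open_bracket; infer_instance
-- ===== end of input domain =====

-- ===== PORT A =====
-- B replaces A's single character scan with two str.find searches; same return values (equivalence is about the return value).
-- A's for-loop over line[start_idx+1:], first '(' → True, first ')' → False; exhaustion raises IndexError (excluded by Pre_).
def pvScanA : List Char → Option Bool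
  | [] => none
  | c :: rest => if c = '(' then some true else if c = ')' then some false else pvScanA rest

def is_next_open_bracket (line : String) (start_idx : Int) : Bool :=
  (pvScanA (PySem.List.slice line.toList (some (start_idx + 1)) none)).getD false

-- ===== PORT B =====
def is_next_open_bracket_alt (line : String) (start_idx : Int) : Bool :=
  let sub := PySem.List.slice line.toList (some (start_idx + 1)) none
  let i := PySem.Chars.find sub ['(']
  let j := PySem.Chars.find sub [')']
  if i = -1 ∧ j = -1 then false  -- Source B raises IndexError here; excluded by Pre_
  else if j = -1 then true
  else if i = -1 then false
  else decide (i < j)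

-- ===== PRECONDITION & SPEC =====
-- Pre_ excludes exactly the inputs where the slice line[start_idx+1:] contains no bracket: there A raises IndexError.
def Pre_is_next_open_bracket (line : String) (start_idx : Int) : Prop :=
  '(' ∈ PySem.List.slice line.toList (some (start_idx + 1)) none ∨
  ')' ∈ PySem.List.slice line.toList (some (start_idx + 1)) none

instance (line : String) (start_idx : Int) : Decidable (Pre_is_next_open_bracket line start_idx) := by
  unfold Pre_is_next_open_bracket; infer_instance

def pvWitness_is_next_open_bracket : String × Int := ("a(b)", 0)

def Spec_is_next_open_bracket (line : String) (start_idx : Int) (out : Bool) : Prop := out = is_next_open_bracket_alt line start_idx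
instance (line : String) (start_idx : Int) (out : Bool) : Decidable (Spec_is_next_open_bracket line start_idx out) := by unfold Spec_is_next_open_bracket; infer_instance

-- ===== CLAIM (what is proved, stated in full; the proofs are below) =====
def Claim_equal_is_next_open_bracket : Prop := ∀ (line : String) (start_idx : Int), Dom_is_next_open_bracket line start_idx → Pre_is_next_open_bracket line start_idx → Spec_is_next_open_bracket line start_idx (is_next_open_bracket line start_idx)

-- ===== LEMMAS AND PROOFS =====
lemma pv_singleton_infix_iff (d : Char) (s : List Char) : [d] <:+: s ↔ d ∈ s := by
  constructor
  · intro h; exact h.subset (by simp)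
  · intro h
    obtain ⟨t1, t2, rfl⟩ := List.append_of_mem h
    exact ⟨t1, t2, by simp⟩

lemma pv_find_eq (s sub : List Char) (k : Nat) (h1 : sub <+: List.drop k s)
    (h2 : ∀ i, i < k → ¬ sub <+: List.drop i s) : PySem.Chars.find s sub = k := by
  have hin : sub <:+: s := by
    rw [← PySem.Chars.isIn_iff_infix, ← PySem.Chars.exists_prefix_drop_iff_isIn]
    exact ⟨k, h1⟩
  have hne : PySem.Chars.find s sub ≠ -1 := (PySem.Chars.find_ne_neg_one_iff s sub).mpr hin
  have hnn : 0 ≤ PySem.Chars.find s sub := by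
    have := PySem.Chars.neg_one_le_find s sub; omega
  obtain ⟨hp, hmin⟩ := PySem.Chars.find_spec hnn
  have hk : (PySem.Chars.find s sub).toNat = k := by
    rcases Nat.lt_trichotomy (PySem.Chars.find s sub).toNat k with h | h | h
    · exact absurd hp (h2 _ h)
    · exact h
    · exact absurd h1 (hmin k h)
  omega

lemma pv_find_singleton_cons (c d : Char) (l : List Char) :
    PySem.Chars.find (c :: l) [d] =
      if c = d then 0
      else if PySem.Chars.find l [d] = -1 then -1
      else PySem.Chars.find l [d] + 1 := by
  by_cases hcd : c = d
  · subst hcd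
    rw [if_pos rfl]
    exact pv_find_eq _ _ 0 ⟨l, by simp⟩ (by omega)
  · rw [if_neg hcd]
    by_cases hfl : PySem.Chars.find l [d] = -1
    · rw [if_pos hfl]
      rw [PySem.Chars.find_eq_neg_one_iff]
      rw [pv_singleton_infix_iff]
      have hdl : d ∉ l := by
        intro hm
        exact absurd ((pv_singleton_infix_iff d l).mpr hm)
          ((PySem.Chars.find_eq_neg_one_iff l [d]).mp hfl)
      simp only [List.mem_cons, not_or]
      exact ⟨fun h => hcd h.symm, hdl⟩
    · rw [if_neg hfl]
      have hnn : 0 ≤ PySem.Chars.find l [d] := by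
        have := PySem.Chars.neg_one_le_find l [d]; omega
      obtain ⟨hp, hmin⟩ := PySem.Chars.find_spec hnn
      have := pv_find_eq (c :: l) [d] ((PySem.Chars.find l [d]).toNat + 1)
        (by simpa using hp)
        (by
          intro i hi hpre
          cases i with
          | zero =>
            obtain ⟨t, ht⟩ := hpre
            simp at ht
            exact hcd ht.1.symm
          | succ m =>
            have hm : m < (PySem.Chars.find l [d]).toNat := by omega
            exact hmin m hm (by simpa using hpre))
      rw [this]; omega

lemma pv_main (l : List Char) (h : '(' ∈ l ∨ ')' ∈ l) :
    (pvScanA l).getD false =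
      (let i := PySem.Chars.find l ['(']
       let j := PySem.Chars.find l [')']
       if i = -1 ∧ j = -1 then false
       else if j = -1 then true
       else if i = -1 then false
       else decide (i < j)) := by
  induction l with
  | nil => simp at h
  | cons c rest ih =>
    simp only [pv_find_singleton_cons]
    by_cases hcop : c = '('
    · subst hcop
      have hnn : -1 ≤ PySem.Chars.find rest [')'] := PySem.Chars.neg_one_le_find rest [')']
      by_cases hr : PySem.Chars.find rest [')'] = -1
      · simp [pvScanA, hr]
      · have h2 : ¬ (PySem.Chars.find rest [')'] + 1 = -1) := by omega
        simp [pvScanA, hr, h2]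
        omega
    · by_cases hc : c = ')'
      · subst hc
        have hnn : -1 ≤ PySem.Chars.find rest ['('] := PySem.Chars.neg_one_le_find rest ['(']
        by_cases hr : PySem.Chars.find rest ['('] = -1
        · simp [pvScanA, hr]
        · have h2 : ¬ (PySem.Chars.find rest ['('] + 1 = -1) := by omega
          simp [pvScanA, hr, h2]
          omega
      · have hmem : '(' ∈ rest ∨ ')' ∈ rest := by
          rcases h with h | h <;> simp_all [List.mem_cons, eq_comm]
        have hni : ¬ (c = '(') := hcop
        have hnj : ¬ (c = ')') := hc
        have hnnI : -1 ≤ PySem.Chars.find rest ['('] := PySem.Chars.neg_one_le_find rest ['(']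
        have hnnJ : -1 ≤ PySem.Chars.find rest [')'] := PySem.Chars.neg_one_le_find rest [')']
        simp only [pvScanA, if_neg hni, if_neg hnj]
        rw [ih hmem]
        by_cases hi : PySem.Chars.find rest ['('] = -1 <;>
          by_cases hj : PySem.Chars.find rest [')'] = -1
        · simp [hi, hj]
        · have h2 : ¬ (PySem.Chars.find rest [')'] + 1 = -1) := by omega
          simp [hi, hj, h2]
        · have h1 : ¬ (PySem.Chars.find rest ['('] + 1 = -1) := by omega
          simp [hi, hj, h1]
        · have h1 : ¬ (PySem.Chars.find rest ['('] + 1 = -1) := by omega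
          have h2 : ¬ (PySem.Chars.find rest [')'] + 1 = -1) := by omega
          simp only [hi, hj, h1, h2, if_neg, not_false_iff, and_false]
          simp only [decide_eq_decide]
          omega

-- ===== VERDICT (by name: the statement is the Claim_ definition above) =====
theorem is_next_open_bracket_spec : Claim_equal_is_next_open_bracket := by
  intro line start_idx _hdom hpre
  unfold Spec_is_next_open_bracket is_next_open_bracket is_next_open_bracket_alt
  exact pv_main _ hpre
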